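-- pv_equiv track=rewrite | github.com/Johnson-Gage-Inspection-Inc/CMCs | src/main.py | flatten_hierarchical_comments
-- ===== SOURCE A (Python) =====
-- def flatten_hierarchical_comments(lines, delimiter="; "):
--     """
--     Given a list of lines (some may start with a leading tab '\t'),
--     transform them so that:
--       - A non-indented line becomes the current "prefix."
--       - Any subsequent indented lines get combined with that prefix.
--       - If a prefix never sees an indented child line, it appears on its own.
--     Returns a new list of strings, each one either "prefix; child" or a lone prefix.
--     """
--     results = []
--     prefix = None
--     prefix_used = False
--
--     for line in lines:
--         if line.startswith("\t"):
--             # Indented => combine with current prefix (if any)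
--             child_text = line.lstrip("\t")
--             if prefix:
--                 results.append(prefix + delimiter + child_text)
--                 prefix_used = True
--             else:
--                 # No prefix => just store child alone
--                 results.append(child_text)
--         else:
--             # New (non-indented) prefix
--             if prefix and not prefix_used:
--                 # Previous prefix had no children => emit it by itself
--                 results.append(prefix)
--             prefix = line
--             prefix_used = False
--
--     # If the final prefix was never used for a child, emit it by itself
--     if prefix and not prefix_used:
--         results.append(prefix)
--
--     return results
-- ===== SOURCE B (Python) =====
-- def flatten_hierarchical_comments(lines, delimiter="; "):
--     # Pass 1: group the lines — each non-indented line starts a new group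
--     # (its value is the group's key); indented lines join the current group.
--     groups = []
--     key, children = None, []
--     for line in lines:
--         if line.startswith("\t"):
--             children.append(line.lstrip("\t"))
--         else:
--             groups.append((key, children))
--             key, children = line, []
--     groups.append((key, children))
--     # Pass 2: emit each group.
--     out = []
--     for key, children in groups:
--         if key:
--             out.extend([key + delimiter + c for c in children] or [key])
--         else:
--             out.extend(children)
--     return out
-- ===== Notes on version B (the rewrite author's own statement) =====
-- stated objective: alternative
-- what changed: Replaces A's single streaming loop with prefix/prefix_used flag state by a two-phase decomposition: first partition the lines into (prefix, children) groups, then emit each group independently.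
import Mathlib
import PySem

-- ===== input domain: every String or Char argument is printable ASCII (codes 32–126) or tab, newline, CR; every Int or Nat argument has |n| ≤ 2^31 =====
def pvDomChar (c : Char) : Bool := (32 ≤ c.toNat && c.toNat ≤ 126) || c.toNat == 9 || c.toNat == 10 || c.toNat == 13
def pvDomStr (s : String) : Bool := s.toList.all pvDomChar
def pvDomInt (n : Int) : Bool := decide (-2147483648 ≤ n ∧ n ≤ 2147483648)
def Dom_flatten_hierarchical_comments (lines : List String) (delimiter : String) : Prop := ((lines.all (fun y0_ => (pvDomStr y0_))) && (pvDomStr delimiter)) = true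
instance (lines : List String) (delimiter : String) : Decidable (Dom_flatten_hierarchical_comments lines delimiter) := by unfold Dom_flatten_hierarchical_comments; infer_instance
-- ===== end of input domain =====

-- B replaces A's streaming prefix/prefix_used flag loop by a two-phase decomposition
-- (group the lines, then emit each group); same cost, proved equal on all inputs.

-- line.lstrip("\t"): drop all leading tabs (exact: dropWhile on the code points)
def pvLstripTabs (line : String) : String := String.ofList (line.toList.dropWhile (fun c => c == '\t'))

-- Python truthiness of the `prefix` variable (None or "" are falsy)
def pvTruthy (o : Option String) : Bool := match o with | none => false | some s => s != ""

-- ===== PORT A =====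
def flatten_hierarchical_comments (lines : List String) (delimiter : String) : List String :=
  let st := lines.foldl
    (fun (st : List String × Option String × Bool) (line : String) =>
      let (results, pfx, used) := st
      if PySem.Str.startswith line "\t" then
        let child := pvLstripTabs line
        if pvTruthy pfx then (results ++ [pfx.getD "" ++ delimiter ++ child], pfx, true)
        else (results ++ [child], pfx, used)
      else
        ((if pvTruthy pfx && !used then results ++ [pfx.getD ""] else results), some line, false))
    ([], none, false)
  let (results, pfx, used) := st
  if pvTruthy pfx && !used then results ++ [pfx.getD ""] else results

-- ===== PORT B =====
def pvEmitGroup (delimiter : String) (g : Option String × List String) : List String :=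
  if pvTruthy g.1 then
    let combined := g.2.map (fun c => g.1.getD "" ++ delimiter ++ c)
    if combined = [] then [g.1.getD ""] else combined
  else g.2

def flatten_hierarchical_comments_alt (lines : List String) (delimiter : String) : List String :=
  let st := lines.foldl
    (fun (st : List (Option String × List String) × Option String × List String) (line : String) =>
      let (groups, key, children) := st
      if PySem.Str.startswith line "\t" then (groups, key, children ++ [pvLstripTabs line])
      else (groups ++ [(key, children)], some line, []))
    ([], none, [])
  let (groups, key, children) := st
  (groups ++ [(key, children)]).flatMap (pvEmitGroup delimiter)

-- ===== PRECONDITION & SPEC =====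
def Spec_flatten_hierarchical_comments (lines : List String) (delimiter : String) (out : List String) : Prop := out = flatten_hierarchical_comments_alt lines delimiter
instance (lines : List String) (delimiter : String) (out : List String) : Decidable (Spec_flatten_hierarchical_comments lines delimiter out) := by unfold Spec_flatten_hierarchical_comments; infer_instance

-- ===== CLAIM (what is proved, stated in full; the proofs are below) =====
def Claim_equal_flatten_hierarchical_comments : Prop := ∀ (lines : List String) (delimiter : String), Dom_flatten_hierarchical_comments lines delimiter → Spec_flatten_hierarchical_comments lines delimiter (flatten_hierarchical_comments lines delimiter)

-- ===== LEMMAS AND PROOFS =====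

-- what A has already emitted for the current group
def pvCurEmit (delimiter : String) (key : Option String) (children : List String) : List String :=
  if pvTruthy key then children.map (fun c => key.getD "" ++ delimiter ++ c) else children

theorem pvMain (delimiter : String) :
    ∀ (ls : List String) (groups : List (Option String × List String))
      (key : Option String) (children : List String),
    (let st := ls.foldl
        (fun (st : List String × Option String × Bool) (line : String) =>
          let (results, pfx, used) := st
          if PySem.Str.startswith line "\t" then
            let child := pvLstripTabs line
            if pvTruthy pfx then (results ++ [pfx.getD "" ++ delimiter ++ child], pfx, true)
            else (results ++ [child], pfx, used)
          else
            ((if pvTruthy pfx && !used then results ++ [pfx.getD ""] else results), some line, false))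
        (groups.flatMap (pvEmitGroup delimiter) ++ pvCurEmit delimiter key children,
         key, pvTruthy key && !children.isEmpty)
     let (results, pfx, used) := st
     if pvTruthy pfx && !used then results ++ [pfx.getD ""] else results)
    =
    (let st := ls.foldl
        (fun (st : List (Option String × List String) × Option String × List String) (line : String) =>
          let (groups, key, children) := st
          if PySem.Str.startswith line "\t" then (groups, key, children ++ [pvLstripTabs line])
          else (groups ++ [(key, children)], some line, []))
        (groups, key, children)
     let (groups, key, children) := st
     (groups ++ [(key, children)]).flatMap (pvEmitGroup delimiter)) := by
  intro ls
  induction ls with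
  | nil =>
    intro groups key children
    simp only [List.foldl_nil, List.flatMap_append, List.flatMap_cons, List.flatMap_nil,
      List.append_nil]
    by_cases ht : pvTruthy key = true
    · rcases children with _ | ⟨c, cs⟩ <;>
        simp [pvCurEmit, pvEmitGroup, ht]
    · simp at ht
      simp [pvCurEmit, pvEmitGroup, ht]
  | cons l ls ih =>
    intro groups key children
    simp only [List.foldl_cons]
    by_cases hs : PySem.Str.startswith l "\t" = true
    · simp only [hs, if_pos]
      by_cases ht : pvTruthy key = true
      · have hne : (children ++ [pvLstripTabs l]).isEmpty = false := by simp
        have := ih groups key (children ++ [pvLstripTabs l])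
        simp only [ht, if_pos, Bool.true_and] at this ⊢
        simpa [pvCurEmit, ht, hne] using this
      · simp at ht
        have := ih groups key (children ++ [pvLstripTabs l])
        simp only [ht] at this ⊢
        simpa [pvCurEmit, ht] using this
    · have := ih (groups ++ [(key, children)]) (some l) []
      simp only [if_neg hs, List.flatMap_append, List.flatMap_cons, List.flatMap_nil,
        List.append_nil, pvCurEmit, List.map_nil, List.isEmpty_nil] at this ⊢
      by_cases ht : pvTruthy key = true
      · rcases children with _ | ⟨c, cs⟩ <;>
          simpa [pvEmitGroup, ht, pvCurEmit] using this
      · simp at ht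
        simpa [pvEmitGroup, ht, pvCurEmit] using this

-- ===== VERDICT (by name: the statement is the Claim_ definition above) =====
theorem flatten_hierarchical_comments_spec : Claim_equal_flatten_hierarchical_comments := by
  intro lines delimiter _
  unfold Spec_flatten_hierarchical_comments flatten_hierarchical_comments flatten_hierarchical_comments_alt
  have := pvMain delimiter lines [] none []
  simpa [pvCurEmit, pvTruthy] using this
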